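-- pv_equiv track=rewrite | github.com/movemin03/postal_code_bulk_search | post_sending_history_scrap.py | extract_popup_data
-- ===== SOURCE A (Python) =====
-- def extract_popup_data(onclick_text):
--     content = onclick_text.replace("return popPrint(", "").rstrip(")")
--     processed_values = []
--     current_value = ''
--     in_quotes = False
--
--     for char in content:
--         if char == "'":
--             if in_quotes:
--                 processed_values.append(current_value)
--                 current_value = ''
--             in_quotes = not in_quotes
--         elif in_quotes:
--             current_value += char
--
--     return processed_values
-- ===== SOURCE B (Python) =====
-- def extract_popup_data(onclick_text):
--     content = onclick_text.replace("return popPrint(", "").rstrip(")")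
--     parts = content.split("'")
--     return [parts[i] for i in range(1, len(parts) - 1, 2)]
-- ===== Notes on version B (the rewrite author's own statement) =====
-- stated objective: simpler
-- what changed: Replaced A's per-character quote-toggling state machine with a single split on the quote character followed by an odd-index comprehension that keeps only fully paired pieces.
import Mathlib
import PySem

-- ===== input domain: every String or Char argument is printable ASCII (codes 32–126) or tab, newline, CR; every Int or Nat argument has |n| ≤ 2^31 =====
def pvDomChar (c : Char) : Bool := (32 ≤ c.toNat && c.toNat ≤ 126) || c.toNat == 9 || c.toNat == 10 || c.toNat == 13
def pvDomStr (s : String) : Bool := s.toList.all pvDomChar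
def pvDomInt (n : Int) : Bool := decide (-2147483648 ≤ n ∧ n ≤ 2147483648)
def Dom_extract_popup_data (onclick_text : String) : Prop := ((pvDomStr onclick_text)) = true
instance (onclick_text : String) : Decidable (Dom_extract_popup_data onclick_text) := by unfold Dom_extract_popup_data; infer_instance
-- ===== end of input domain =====

-- B replaces A's per-character quote state machine by split-on-quote plus an odd-index comprehension (objective: simpler; same O(n) cost).

-- exact port of s.rstrip(")"): drop the trailing run of ')' characters
def pvRstripParen (cs : List Char) : List Char :=
  (cs.reverse.dropWhile (fun c => c == ')')).reverse

-- ===== PORT A =====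
-- A's for-loop: state (processed_values, current_value, in_quotes); strings kept as List Char, wrapped by String.ofList at the end
def extractLoopA : List Char → List (List Char) → List Char → Bool → List (List Char)
  | [], acc, _, _ => acc
  | c :: cs, acc, cur, inq =>
    if c == '\'' then
      if inq then extractLoopA cs (acc ++ [cur]) [] false
      else extractLoopA cs acc cur true
    else if inq then extractLoopA cs acc (cur ++ [c]) inq
    else extractLoopA cs acc cur inq

def extract_popup_data (onclick_text : String) : List String :=
  let content := pvRstripParen (PySem.Chars.replace onclick_text.toList "return popPrint(".toList [])
  (extractLoopA content [] [] false).map String.ofList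

-- ===== PORT B =====
def extract_popup_data_alt (onclick_text : String) : List String :=
  let content := pvRstripParen (PySem.Chars.replace onclick_text.toList "return popPrint(".toList [])
  let parts := PySem.Chars.splitOn content ['\'']
  (PySem.List.pyRange 1 ((parts.length : Int) - 1) 2).map
    (fun i => String.ofList (PySem.List.pyGetD parts i []))

-- ===== PRECONDITION & SPEC =====
def Spec_extract_popup_data (onclick_text : String) (out : List String) : Prop := out = extract_popup_data_alt onclick_text
instance (onclick_text : String) (out : List String) : Decidable (Spec_extract_popup_data onclick_text out) := by unfold Spec_extract_popup_data; infer_instance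

-- ===== CLAIM (what is proved, stated in full; the proofs are below) =====
def Claim_equal_extract_popup_data : Prop := ∀ (onclick_text : String), Dom_extract_popup_data onclick_text → Spec_extract_popup_data onclick_text (extract_popup_data onclick_text)

-- ===== LEMMAS AND PROOFS =====

-- the pieces at odd indices 1, 3, …, except an unpaired last one
def oddPieces : List (List Char) → List (List Char)
  | _ :: y :: rest => if rest.isEmpty then [] else y :: oddPieces rest
  | _ => []

-- what the in-quotes state of A's loop produces, as a function of the remaining split pieces
def inSide (cur : List Char) : List (List Char) → List (List Char)
  | [] => []
  | h :: t => if t.isEmpty then [] else (cur ++ h) :: oddPieces t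

theorem oddPieces_cons_irrel (x y : List Char) (t : List (List Char)) :
    oddPieces (x :: t) = oddPieces (y :: t) := by
  cases t <;> simp [oddPieces]

theorem modifyHead_self {α : Type} (l : List α) : l.modifyHead (fun x => x) = l := by
  cases l <;> simp

-- PySem.Chars.splitOn with a single-character separator is Mathlib's splitOnP
theorem splitOn_go_single (q : Char) (l : List Char) :
    ∀ (fuel : Nat) (cur : List Char) (acc : List (List Char)), l.length < fuel →
      PySem.Chars.splitOn.go [q] fuel l cur acc
        = acc.reverse ++ (List.splitOnP (· == q) l).modifyHead (cur.reverse ++ ·) := by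
  induction l with
  | nil =>
    intro fuel cur acc h
    cases fuel with
    | zero => omega
    | succ f => simp [PySem.Chars.splitOn.go, List.splitOnP_nil]
  | cons c rest ih =>
    intro fuel cur acc h
    cases fuel with
    | zero => omega
    | succ f =>
      by_cases hq : q = c
      · subst hq
        rw [show PySem.Chars.splitOn.go [q] (f+1) (q :: rest) cur acc
              = PySem.Chars.splitOn.go [q] f rest [] (cur.reverse :: acc) by
            simp [PySem.Chars.splitOn.go, List.isPrefixOf]]
        rw [ih f [] (cur.reverse :: acc) (by simpa using Nat.lt_of_succ_lt_succ h)]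
        rw [List.splitOnP_cons]
        simp [modifyHead_self]
      · rw [show PySem.Chars.splitOn.go [q] (f+1) (c :: rest) cur acc
              = PySem.Chars.splitOn.go [q] f rest (c :: cur) acc by
            simp only [PySem.Chars.splitOn.go, List.isPrefixOf, Bool.and_true, beq_iff_eq]
            rw [if_neg hq]]
        rw [ih f (c :: cur) acc (by simpa using Nat.lt_of_succ_lt_succ h)]
        rw [List.splitOnP_cons, if_neg (by simpa using fun h' => hq h'.symm),
          List.modifyHead_modifyHead]
        congr 1
        cases List.splitOnP (· == q) rest <;> simp

theorem splitOn_single (cs : List Char) (q : Char) :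
    PySem.Chars.splitOn cs [q] = List.splitOnP (· == q) cs := by
  have := splitOn_go_single q cs (cs.length + 1) [] [] (by omega)
  simpa [PySem.Chars.splitOn, modifyHead_self] using this

-- A's loop computes oddPieces of the split pieces
theorem loopA_split (cs : List Char) : ∀ (acc : List (List Char)) (cur : List Char),
    (extractLoopA cs acc [] false = acc ++ oddPieces (List.splitOnP (· == '\'') cs)) ∧
    (extractLoopA cs acc cur true = acc ++ inSide cur (List.splitOnP (· == '\'') cs)) := by
  induction cs with
  | nil =>
    intro acc cur
    simp [extractLoopA, List.splitOnP_nil, oddPieces, inSide]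
  | cons c rest ih =>
    intro acc cur
    by_cases hq : c = '\''
    · subst hq
      constructor
      · rw [show extractLoopA ('\'' :: rest) acc [] false = extractLoopA rest acc [] true by
            simp [extractLoopA]]
        rw [(ih acc []).2]
        rw [List.splitOnP_cons]
        simp [inSide]
        rcases h : List.splitOnP (· == '\'') rest with _ | ⟨h1, t1⟩
        · exact absurd h (List.splitOnP_ne_nil _ _)
        · simp [oddPieces]
      · rw [show extractLoopA ('\'' :: rest) acc cur true
              = extractLoopA rest (acc ++ [cur]) [] false by simp [extractLoopA]]
        rw [(ih (acc ++ [cur]) []).1]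
        rw [List.splitOnP_cons]
        simp [inSide]
        rcases h : List.splitOnP (· == '\'') rest with _ | ⟨h1, t1⟩
        · exact absurd h (List.splitOnP_ne_nil _ _)
        · simp
    · constructor
      · rw [show extractLoopA (c :: rest) acc [] false = extractLoopA rest acc [] false by
            simp [extractLoopA, hq]]
        rw [(ih acc []).1]
        rw [List.splitOnP_cons]
        simp [hq]
        rcases h : List.splitOnP (· == '\'') rest with _ | ⟨h1, t1⟩
        · exact absurd h (List.splitOnP_ne_nil _ _)
        · simp [List.modifyHead, oddPieces_cons_irrel (c :: h1) h1]
      · rw [show extractLoopA (c :: rest) acc cur true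
              = extractLoopA rest acc (cur ++ [c]) true by simp [extractLoopA, hq]]
        rw [(ih acc (cur ++ [c])).2]
        rw [List.splitOnP_cons]
        simp [hq]
        rcases h : List.splitOnP (· == '\'') rest with _ | ⟨h1, t1⟩
        · exact absurd h (List.splitOnP_ne_nil _ _)
        · simp [List.modifyHead, inSide]

-- the odd-index comprehension over List.range equals oddPieces
theorem rangeMap_oddPieces (ps : List (List Char)) :
    (List.range ((ps.length - 1) / 2)).map (fun k => ps.getD (1 + 2 * k) []) = oddPieces ps := by
  induction ps using oddPieces.induct with
  | case1 x y rest hemp =>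
    rw [List.isEmpty_iff] at hemp
    subst hemp
    simp [oddPieces]
  | case2 x y rest hemp ih =>
    have hne : rest ≠ [] := by simpa [List.isEmpty_iff] using hemp
    have hlen : (x :: y :: rest).length = rest.length + 2 := by simp
    have hn : ((x :: y :: rest).length - 1) / 2 = (rest.length - 1) / 2 + 1 := by
      rw [hlen]
      cases rest with
      | nil => exact absurd rfl hne
      | cons r rs => simp
    rw [hn, List.range_succ_eq_map, List.map_cons, List.map_map]
    have hstep : ((fun k => (x :: y :: rest).getD (1 + 2 * k) ([] : List Char)) ∘ Nat.succ)
        = fun k => rest.getD (1 + 2 * k) [] := by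
      funext k
      show (x :: y :: rest).getD (1 + 2 * (k + 1)) [] = rest.getD (1 + 2 * k) []
      rw [show 1 + 2 * (k + 1) = (1 + 2 * k) + 1 + 1 by omega]
      simp
    rw [hstep, ih]
    simp [oddPieces, hemp]
  | case3 ps hno =>
    cases ps with
    | nil => simp [oddPieces]
    | cons x t =>
      cases t with
      | nil => simp [oddPieces]
      | cons y rest => exact absurd rfl (hno x y rest)

-- B's pyRange comprehension equals oddPieces
theorem pyRangeMap_oddPieces (ps : List (List Char)) :
    (PySem.List.pyRange 1 ((ps.length : Int) - 1) 2).map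
      (fun i => PySem.List.pyGetD ps i []) = oddPieces ps := by
  rw [PySem.List.pyRange_of_pos 1 ((ps.length : Int) - 1) (by norm_num)]
  have hcount : (if (1 : Int) < (ps.length : Int) - 1
      then (((ps.length : Int) - 1 - 1 + 2 - 1) / 2).toNat else 0) = (ps.length - 1) / 2 := by
    split_ifs with h
    · omega
    · omega
  rw [hcount, List.map_map]
  rw [← rangeMap_oddPieces ps]
  apply List.map_congr_left
  intro k _
  show PySem.List.pyGetD ps (1 + 2 * (k : Int)) [] = ps.getD (1 + 2 * k) []
  rw [show (1 : Int) + 2 * (k : Int) = ((1 + 2 * k : Nat) : Int) by push_cast; ring]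
  rw [PySem.List.pyGetD_natCast]

-- ===== VERDICT (by name: the statement is the Claim_ definition above) =====
theorem extract_popup_data_spec : Claim_equal_extract_popup_data := by
  intro s _
  show extract_popup_data s = extract_popup_data_alt s
  unfold extract_popup_data extract_popup_data_alt
  dsimp only
  rw [splitOn_single]
  rw [show (fun i => String.ofList (PySem.List.pyGetD (List.splitOnP (· == '\'') (pvRstripParen (PySem.Chars.replace s.toList "return popPrint(".toList []))) i []))
        = String.ofList ∘ (fun i => PySem.List.pyGetD (List.splitOnP (· == '\'') (pvRstripParen (PySem.Chars.replace s.toList "return popPrint(".toList []))) i []) from rfl]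
  rw [← List.map_map, pyRangeMap_oddPieces]
  rw [(loopA_split _ [] []).1]
  simp
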